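-- pv_equiv track=rewrite | github.com/DIG-Network/proof_research | sub-problems/verifier-oracle-model/experiments/partial-view-z-interval-formula-regression/script.py | brute_counts
-- ===== SOURCE A (Python) =====
-- from itertools import combinations
--
-- def feasible(z: int, r: int, target_wt: int) -> bool:
--     need = target_wt - z
--     return 0 <= need <= r
--
-- def cell(ok_sub: bool, ok_q: bool) -> str:
--     if ok_sub and ok_q:
--         return "both"
--     if ok_sub and not ok_q:
--         return "only_wt5"
--     if not ok_sub and ok_q:
--         return "only_wt6"
--     return "neither"
--
-- def popcount(pat: int, k: int) -> int:
--     z = 0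
--     for i in range(k):
--         if (pat >> i) & 1:
--             z += 1
--     return z
--
-- def brute_counts(n: int, k: int, t: int) -> dict[str, int]:
--     r = n - k
--     counts = {c: 0 for c in ("both", "only_wt5", "only_wt6", "neither")}
--     for _q in combinations(range(n), k):
--         for pat in range(1 << k):
--             z = popcount(pat, k)
--             ok_sub = feasible(z, r, t - 1)
--             ok_q = feasible(z, r, t)
--             counts[cell(ok_sub, ok_q)] += 1
--     return counts
-- ===== SOURCE B (Python) =====
-- def brute_counts(n: int, k: int, t: int) -> dict[str, int]:
--     # The category of a pattern depends only on its popcount z, and the inner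
--     # work is independent of the chosen subset q.  So: multiply by the number
--     # of k-subsets of range(n), and weight each z in 0..k by C(k, z).
--     r = n - k
--     m = n if n > 0 else 0
--     counts = {c: 0 for c in ("both", "only_wt5", "only_wt6", "neither")}
--     if k > m:                      # no k-subsets of range(n): nothing to count
--         return counts
--     total = 1                      # running C(m, i), falling-factorial style
--     for i in range(k):
--         total = total * (m - i) // (i + 1)
--     w = 1                          # running C(k, z)
--     for z in range(k + 1):
--         ok_sub = 0 <= t - 1 - z <= r
--         ok_q = 0 <= t - z <= r
--         if ok_sub and ok_q:
--             key = "both"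
--         elif ok_sub:
--             key = "only_wt5"
--         elif ok_q:
--             key = "only_wt6"
--         else:
--             key = "neither"
--         counts[key] += total * w
--         w = w * (k - z) // (z + 1)
--     return counts
-- ===== Notes on version B (the rewrite author's own statement) =====
-- stated objective: faster
-- what changed: The inner work never looks at the chosen subset q and depends on a pattern only through its popcount z, so B drops the combinations loop entirely (multiplying by C(n,k), computed as a falling-factorial product) and replaces the 2^k pattern scan by a single z = 0..k loop weighted by the running binomial C(k,z); intended as faster (a timing run saw A time out at n=16 where B returned, but could not measure a clean ratio).
import Mathlib
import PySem

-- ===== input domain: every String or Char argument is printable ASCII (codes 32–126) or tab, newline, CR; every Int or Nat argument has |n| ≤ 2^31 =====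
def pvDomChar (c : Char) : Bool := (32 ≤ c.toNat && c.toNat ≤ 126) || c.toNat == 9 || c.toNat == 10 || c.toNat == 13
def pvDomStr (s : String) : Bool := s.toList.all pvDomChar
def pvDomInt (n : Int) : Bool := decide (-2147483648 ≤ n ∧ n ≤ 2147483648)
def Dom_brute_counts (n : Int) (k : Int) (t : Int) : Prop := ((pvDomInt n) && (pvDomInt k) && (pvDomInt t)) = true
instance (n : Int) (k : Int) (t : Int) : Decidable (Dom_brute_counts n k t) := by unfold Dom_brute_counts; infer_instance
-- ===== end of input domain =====

-- B drops A's redundant subset loop (a factor C(n,k)) and replaces the 2^k pattern scan by a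
-- single z = 0..k loop weighted by running binomial coefficients: intended as faster
-- (timing: A timed out at n=16 where B returned; no clean ratio was measurable).

-- ===== PORT A =====
def feasible (z : Int) (r : Int) (target_wt : Int) : Bool :=
  decide (0 ≤ target_wt - z ∧ target_wt - z ≤ r)

def cell (ok_sub : Bool) (ok_q : Bool) : String :=
  if ok_sub && ok_q then "both"
  else if ok_sub && !ok_q then "only_wt5"
  else if !ok_sub && ok_q then "only_wt6"
  else "neither"

-- `(pat >> i) & 1` : i comes from range(k), so i ≥ 0 and `i.toNat` is exact there.
def popcount (pat : Int) (k : Int) : Int :=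
  (PySem.List.pyRange 0 k 1).foldl
    (fun z i => if PySem.Int.band (pat >>> i.toNat) 1 ≠ 0 then z + 1 else z) 0

-- itertools.combinations(xs, kk) in its lexicographic emission order
-- (the r > n early exit mirrors CPython's combinations, which yields nothing then;
--  it returns the same value the unguarded recursion would)
def combs : Nat → List Int → List (List Int)
  | 0, _ => [[]]
  | _ + 1, [] => []
  | kk + 1, x :: xs =>
      if xs.length + 1 < kk + 1 then []
      else (combs kk xs).map (fun c => x :: c) ++ combs (kk + 1) xs

-- `1 << k` / combinations(range(n), k): k ≥ 0 by Pre_, so `k.toNat` is exact there.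
def brute_counts (n : Int) (k : Int) (t : Int) : List (String × Int) :=
  let r := n - k
  let counts0 : PySem.Dict String Int :=
    (["both", "only_wt5", "only_wt6", "neither"]).foldl
      (fun d c => d.insert c 0) PySem.Dict.empty
  let res := (combs k.toNat (PySem.List.pyRange 0 n 1)).foldl
    (fun counts _q =>
      (PySem.List.pyRange 0 ((1 : Int) <<< k.toNat) 1).foldl
        (fun counts pat =>
          let z := popcount pat k
          let ok_sub := feasible z r (t - 1)
          let ok_q := feasible z r t
          counts.modify (cell ok_sub ok_q) 0 (fun v => v + 1)) counts) counts0
  res.items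

-- ===== PORT B =====
def brute_counts_alt (n : Int) (k : Int) (t : Int) : List (String × Int) :=
  let r := n - k
  let m := if n > 0 then n else 0
  let counts0 : PySem.Dict String Int :=
    (["both", "only_wt5", "only_wt6", "neither"]).foldl
      (fun d c => d.insert c 0) PySem.Dict.empty
  if k > m then counts0.items
  else
    let total := (PySem.List.pyRange 0 k 1).foldl
      (fun tot i => PySem.Int.floordiv (tot * (m - i)) (i + 1)) 1
    let st := (PySem.List.pyRange 0 (k + 1) 1).foldl
      (fun (st : PySem.Dict String Int × Int) z =>
        let ok_sub := decide (0 ≤ t - 1 - z ∧ t - 1 - z ≤ r)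
        let ok_q := decide (0 ≤ t - z ∧ t - z ≤ r)
        let key := if ok_sub && ok_q then "both"
                   else if ok_sub then "only_wt5"
                   else if ok_q then "only_wt6"
                   else "neither"
        (st.1.modify key 0 (fun v => v + total * st.2),
         PySem.Int.floordiv (st.2 * (k - z)) (z + 1)))
      (counts0, 1)
    st.1.items

-- ===== PRECONDITION & SPEC =====
-- Pre_ excludes exactly k < 0, where A raises ValueError (combinations with negative r).
def Pre_brute_counts (n : Int) (k : Int) (t : Int) : Prop := 0 ≤ k
instance (n : Int) (k : Int) (t : Int) : Decidable (Pre_brute_counts n k t) := by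
  unfold Pre_brute_counts; infer_instance
def pvWitness_brute_counts : Int × Int × Int := (3, 2, 1)

def Spec_brute_counts (n : Int) (k : Int) (t : Int) (out : List (String × Int)) : Prop :=
  out = brute_counts_alt n k t
instance (n : Int) (k : Int) (t : Int) (out : List (String × Int)) :
    Decidable (Spec_brute_counts n k t out) := by unfold Spec_brute_counts; infer_instance

-- ===== CLAIM (what is proved, stated in full; the proofs are below) =====
def Claim_equal_brute_counts : Prop := ∀ (n : Int) (k : Int) (t : Int),
  Dom_brute_counts n k t → Pre_brute_counts n k t →
  Spec_brute_counts n k t (brute_counts n k t)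

-- ===== LEMMAS AND PROOFS =====

-- the dict both loops maintain: always the four fixed keys, in insertion order
def mk4 (a b c e : Int) : PySem.Dict String Int :=
  PySem.Dict.mk [("both", a), ("only_wt5", b), ("only_wt6", c), ("neither", e)]

theorem counts0_eq :
    ((["both", "only_wt5", "only_wt6", "neither"] : List String).foldl
      (fun d c => d.insert c 0) PySem.Dict.empty) = mk4 0 0 0 0 := rfl

theorem modify_mk4_both (a b c e : Int) (f : Int → Int) :
    (mk4 a b c e).modify "both" 0 f = mk4 (f a) b c e := rfl
theorem modify_mk4_w5 (a b c e : Int) (f : Int → Int) :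
    (mk4 a b c e).modify "only_wt5" 0 f = mk4 a (f b) c e := rfl
theorem modify_mk4_w6 (a b c e : Int) (f : Int → Int) :
    (mk4 a b c e).modify "only_wt6" 0 f = mk4 a b (f c) e := rfl
theorem modify_mk4_nei (a b c e : Int) (f : Int → Int) :
    (mk4 a b c e).modify "neither" 0 f = mk4 a b c (f e) := rfl

theorem mk4_inj {a b c e a' b' c' e' : Int} :
    mk4 a b c e = mk4 a' b' c' e' ↔ (a = a' ∧ b = b' ∧ c = c' ∧ e = e') := by
  simp [mk4]

-- the category of a popcount z, as B's key chain computes it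
def catI (r t : Int) (z : Int) : String :=
  if decide (0 ≤ t - 1 - z ∧ t - 1 - z ≤ r) && decide (0 ≤ t - z ∧ t - z ≤ r) then "both"
  else if decide (0 ≤ t - 1 - z ∧ t - 1 - z ≤ r) then "only_wt5"
  else if decide (0 ≤ t - z ∧ t - z ≤ r) then "only_wt6"
  else "neither"

theorem cell_chain (a b : Bool) : cell a b =
    (if a && b then "both" else if a then "only_wt5" else if b then "only_wt6" else "neither") := by
  cases a <;> cases b <;> rfl

theorem cell_cat (r t z : Int) :
    cell (feasible z r (t - 1)) (feasible z r t) = catI r t z := by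
  rw [cell_chain]; rfl

theorem cat4 (r t z : Int) : catI r t z = "both" ∨ catI r t z = "only_wt5" ∨
    catI r t z = "only_wt6" ∨ catI r t z = "neither" := by
  unfold catI; split_ifs <;> simp

-- ---------- A's inner pattern loop ----------
def patCnt (r t k : Int) (key : String) (L : List Int) : Nat :=
  L.countP (fun pat => catI r t (popcount pat k) == key)

theorem innerA (r t k : Int) (L : List Int) : ∀ a b c e : Int,
    L.foldl (fun counts pat =>
        counts.modify (cell (feasible (popcount pat k) r (t - 1)) (feasible (popcount pat k) r t))
          0 (fun v => v + 1)) (mk4 a b c e)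
    = mk4 (a + (patCnt r t k "both" L : Int)) (b + (patCnt r t k "only_wt5" L : Int))
          (c + (patCnt r t k "only_wt6" L : Int)) (e + (patCnt r t k "neither" L : Int)) := by
  induction L with
  | nil => intro a b c e; simp [patCnt]
  | cons x L ih =>
    intro a b c e
    rw [List.foldl_cons, cell_cat]
    rcases cat4 r t (popcount x k) with h | h | h | h <;>
      [rw [h, modify_mk4_both]; rw [h, modify_mk4_w5]; rw [h, modify_mk4_w6];
       rw [h, modify_mk4_nei]] <;>
      rw [ih] <;>
      rw [mk4_inj] <;>
      refine ⟨?_, ?_, ?_, ?_⟩ <;>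
      simp [patCnt, h] <;>
      push_cast <;> ring

-- ---------- A's outer subset loop (the body never looks at the subset) ----------
theorem outerA (r t k : Int) (L : List Int) (M : List (List Int)) : ∀ a b c e : Int,
    M.foldl (fun counts _q =>
        L.foldl (fun counts pat =>
          counts.modify
            (cell (feasible (popcount pat k) r (t - 1)) (feasible (popcount pat k) r t))
            0 (fun v => v + 1)) counts) (mk4 a b c e)
    = mk4 (a + (M.length : Int) * (patCnt r t k "both" L : Int))
          (b + (M.length : Int) * (patCnt r t k "only_wt5" L : Int))
          (c + (M.length : Int) * (patCnt r t k "only_wt6" L : Int))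
          (e + (M.length : Int) * (patCnt r t k "neither" L : Int)) := by
  induction M with
  | nil => intro a b c e; simp
  | cons q M ih =>
    intro a b c e
    rw [List.foldl_cons, innerA, ih, mk4_inj]
    refine ⟨?_, ?_, ?_, ?_⟩ <;> simp only [List.length_cons] <;> push_cast <;> ring

theorem combs_length (kk : Nat) (L : List Int) : (combs kk L).length = L.length.choose kk := by
  induction L generalizing kk with
  | nil => cases kk <;> simp [combs]
  | cons x xs ih =>
    cases kk with
    | zero => simp [combs]
    | succ kk =>
      simp only [combs]
      by_cases h : xs.length + 1 < kk + 1
      · rw [if_pos h]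
        simp only [List.length_nil, List.length_cons]
        rw [Nat.choose_eq_zero_of_lt (by omega)]
      · rw [if_neg h]
        simp [ih, Nat.choose_succ_succ]

-- ---------- popcount over range(1 << k) is binomially distributed ----------
def pcnt (K x : Nat) : Nat := (List.range K).countP (fun j => x.testBit j)

theorem band_one_ne_zero (x j : Nat) :
    (PySem.Int.band (((x >>> j : Nat) : Int)) 1 ≠ 0) ↔ x.testBit j = true := by
  have h2 : PySem.Int.band ((x >>> j : Nat) : Int) 1 = (((x >>> j) &&& 1 : Nat) : Int) := by
    exact_mod_cast PySem.Int.band_natCast (x >>> j) 1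
  rw [h2]
  rw [Nat.testBit, Nat.and_one_is_mod]
  rcases Nat.mod_two_eq_zero_or_one (x >>> j) with h | h <;> simp [h]

theorem foldl_bit_count (x : Nat) (L : List Nat) : ∀ z : Int,
    L.foldl (fun (z : Int) (j : Nat) => if PySem.Int.band (((x >>> j : Nat) : Int)) 1 ≠ 0 then z + 1 else z) z
    = z + (L.countP (fun j => x.testBit j) : Int) := by
  induction L with
  | nil => intro z; simp
  | cons j L ih =>
    intro z
    rw [List.foldl_cons]
    by_cases h : x.testBit j
    · rw [if_pos ((band_one_ne_zero x j).mpr h), ih]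
      simp [h]
      push_cast
      ring
    · rw [if_neg (fun hc => h ((band_one_ne_zero x j).mp hc)), ih]
      simp [h]

theorem pyRange_natCast' (J : Nat) :
    PySem.List.pyRange 0 (J : Int) 1 = (List.range J).map (fun (j : Nat) => (j : Int)) := by
  rw [PySem.List.pyRange_one]; simp

theorem popcount_cast (K x : Nat) : popcount (x : Int) (K : Int) = (pcnt K x : Int) := by
  unfold popcount pcnt
  rw [pyRange_natCast', List.foldl_map]
  simp only [Int.toNat_natCast, Int.shiftRight_natCast]
  have h := foldl_bit_count x (List.range K) 0
  rw [zero_add] at h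
  exact h

theorem pcnt_lo (K x : Nat) (h : x < 2 ^ K) : pcnt (K + 1) x = pcnt K x := by
  unfold pcnt
  rw [List.range_succ, List.countP_append]
  simp [Nat.testBit_lt_two_pow h]

theorem pcnt_hi (K x : Nat) (h : x < 2 ^ K) : pcnt (K + 1) (2 ^ K + x) = pcnt K x + 1 := by
  unfold pcnt
  rw [List.range_succ, List.countP_append]
  have h1 : (List.range K).countP (fun j => (2 ^ K + x).testBit j)
      = (List.range K).countP (fun j => x.testBit j) := by
    apply List.countP_congr
    intro j hj
    rw [Nat.testBit_two_pow_add_gt (List.mem_range.mp hj)]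
  rw [h1]
  simp [Nat.testBit_two_pow_add_eq, Nat.testBit_lt_two_pow h]

theorem pats_succ (K : Nat) :
    (List.range (2 ^ (K + 1))).map (pcnt (K + 1))
    = (List.range (2 ^ K)).map (pcnt K)
      ++ ((List.range (2 ^ K)).map (pcnt K)).map (fun z => z + 1) := by
  have h2 : 2 ^ (K + 1) = 2 ^ K + 2 ^ K := by ring
  rw [h2, List.range_add, List.map_append]
  congr 1
  · exact List.map_congr_left (fun x hx => pcnt_lo K x (List.mem_range.mp hx))
  · rw [List.map_map, List.map_map]
    refine List.map_congr_left (fun x hx => ?_)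
    simp only [Function.comp_apply]
    exact pcnt_hi K x (List.mem_range.mp hx)

theorem countP_pats (K : Nat) (f : Nat → Bool) :
    ((List.range (2 ^ K)).map (pcnt K)).countP f
    = ∑ z ∈ Finset.range (K + 1), K.choose z * (if f z then 1 else 0) := by
  induction K generalizing f with
  | zero => cases hf : f 0 <;> simp [pcnt, hf, pow_zero, List.range_one]
  | succ K ih =>
    rw [pats_succ, List.countP_append, ih, List.countP_map, ih]
    simp only [Function.comp_apply]
    have key : ∀ g : Nat → Nat,
        (∑ z ∈ Finset.range (K + 1), K.choose z * g z)
        = (∑ z ∈ Finset.range (K + 1), K.choose (z + 1) * g (z + 1)) + K.choose 0 * g 0 := by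
      intro g
      have h1 : ∑ z ∈ Finset.range (K + 2), K.choose z * g z
          = (∑ z ∈ Finset.range (K + 1), K.choose (z + 1) * g (z + 1)) + K.choose 0 * g 0 :=
        Finset.sum_range_succ' (fun z => K.choose z * g z) (K + 1)
      have h2 : ∑ z ∈ Finset.range (K + 2), K.choose z * g z
          = (∑ z ∈ Finset.range (K + 1), K.choose z * g z) + K.choose (K + 1) * g (K + 1) :=
        Finset.sum_range_succ (fun z => K.choose z * g z) (K + 1)
      rw [Nat.choose_succ_self, zero_mul, add_zero] at h2
      omega
    rw [Finset.sum_range_succ' (fun z => (K + 1).choose z * (if f z then 1 else 0)) (K + 1)]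
    simp only [Nat.choose_succ_succ, Nat.succ_eq_add_one, add_mul, Finset.sum_add_distrib,
      Nat.choose_zero_right, one_mul]
    rw [key (fun z => if f z then 1 else 0)]
    simp only [Nat.choose_zero_right, one_mul]
    ring

-- ---------- the per-key weighted binomial sum both programs compute ----------
def wsum (r t : Int) (K : Nat) (key : String) : Nat :=
  ∑ z ∈ Finset.range (K + 1), K.choose z * (if catI r t (z : Int) == key then 1 else 0)

theorem patCnt_eq (r t kk : Int) (K : Nat) (hkk : kk = (K : Int)) (key : String) :
    patCnt r t kk key (PySem.List.pyRange 0 ((1 : Int) <<< K) 1) = wsum r t K key := by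
  subst hkk
  unfold patCnt wsum
  have h1 : ((1 : Int) <<< K) = ((2 ^ K : Nat) : Int) := by
    rw [Int.shiftLeft_eq]; push_cast; ring
  rw [h1, pyRange_natCast', List.countP_map]
  have h2 : (List.range (2 ^ K)).countP
        ((fun pat => catI r t (popcount pat ((K : Nat) : Int)) == key) ∘ (fun (j : Nat) => (j : Int)))
      = (List.range (2 ^ K)).countP ((fun (z : Nat) => catI r t (z : Int) == key) ∘ (pcnt K)) := by
    apply List.countP_congr
    intro x _
    simp only [Function.comp_apply]
    rw [popcount_cast]
  rw [h2, ← List.countP_map, countP_pats]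

-- ---------- the falling-factorial binomial recurrences in B ----------
theorem choose_step (M i : Nat) :
    PySem.Int.floordiv ((M.choose i : Int) * ((M : Int) - (i : Int))) ((i : Int) + 1)
    = (M.choose (i + 1) : Int) := by
  rcases lt_trichotomy i M with h | h | h
  · have hsub : (M : Int) - (i : Int) = ((M - i : Nat) : Int) := by
      push_cast [Nat.cast_sub h.le]; ring
    have hcast : ((i : Int) + 1) = ((i + 1 : Nat) : Int) := by push_cast; ring
    rw [hsub, hcast, ← Nat.cast_mul, PySem.Int.floordiv_natCast]
    have : M.choose i * (M - i) = M.choose (i + 1) * (i + 1) := by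
      rw [← Nat.choose_succ_right_eq]
    rw [this, Nat.mul_div_cancel _ (Nat.succ_pos i)]
  · subst h
    simp [Nat.choose_succ_self]
  · rw [Nat.choose_eq_zero_of_lt h, Nat.choose_eq_zero_of_lt (by omega)]
    simp

theorem total_loop (N : Nat) : ∀ (J : Nat),
    ((List.range J).map (fun (j : Nat) => (j : Int))).foldl
      (fun tot i => PySem.Int.floordiv (tot * ((N : Int) - i)) (i + 1)) 1
    = (N.choose J : Int) := by
  intro J
  induction J with
  | zero => simp
  | succ J ih =>
    rw [List.range_succ, List.map_append, List.foldl_append, ih]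
    simp only [List.map_cons, List.map_nil, List.foldl_cons, List.foldl_nil]
    exact choose_step N J

-- ---------- B's single z-loop ----------
theorem B_loop (r t total k : Int) (K : Nat) (hk : k = (K : Int)) (J : Nat) :
    ∀ a b c e : Int,
    ((List.range J).map (fun (z : Nat) => (z : Int))).foldl
      (fun (st : PySem.Dict String Int × Int) z =>
        (st.1.modify (catI r t z) 0 (fun v => v + total * st.2),
         PySem.Int.floordiv (st.2 * (k - z)) (z + 1)))
      (mk4 a b c e, 1)
    = (mk4 (a + ∑ z ∈ Finset.range J,
              (if catI r t (z : Int) == "both" then total * (K.choose z : Int) else 0))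
           (b + ∑ z ∈ Finset.range J,
              (if catI r t (z : Int) == "only_wt5" then total * (K.choose z : Int) else 0))
           (c + ∑ z ∈ Finset.range J,
              (if catI r t (z : Int) == "only_wt6" then total * (K.choose z : Int) else 0))
           (e + ∑ z ∈ Finset.range J,
              (if catI r t (z : Int) == "neither" then total * (K.choose z : Int) else 0)),
       (K.choose J : Int)) := by
  induction J with
  | zero => intro a b c e; simp
  | succ J ih =>
    intro a b c e
    rw [List.range_succ, List.map_append, List.foldl_append, ih]
    simp only [List.map_cons, List.map_nil, List.foldl_cons, List.foldl_nil]
    have hdiv : PySem.Int.floordiv ((K.choose J : Int) * (k - (J : Int))) ((J : Int) + 1)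
        = (K.choose (J + 1) : Int) := by rw [hk]; exact choose_step K J
    rcases cat4 r t (J : Int) with h | h | h | h <;>
      [rw [h, modify_mk4_both]; rw [h, modify_mk4_w5]; rw [h, modify_mk4_w6];
       rw [h, modify_mk4_nei]] <;>
      rw [hdiv] <;>
      refine Prod.ext ?_ rfl <;>
      rw [mk4_inj] <;>
      refine ⟨?_, ?_, ?_, ?_⟩ <;>
      rw [Finset.sum_range_succ] <;>
      simp [h, add_assoc]

-- ---------- assembling both sides to the same closed form ----------
theorem comp_eq (total : Int) (K : Nat) (g : Nat → Bool) :
    total * ((∑ z ∈ Finset.range (K + 1), K.choose z * (if g z then 1 else 0) : Nat) : Int)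
    = ∑ z ∈ Finset.range (K + 1), (if g z then total * (K.choose z : Int) else 0) := by
  push_cast
  rw [Finset.mul_sum]
  refine Finset.sum_congr rfl (fun z _ => ?_)
  by_cases h : g z <;> simp [h] <;> ring

theorem A_eq (n k t : Int) (hk : 0 ≤ k) :
    brute_counts n k t
    = (mk4 (((n.toNat.choose k.toNat : Nat) : Int) * ((wsum (n - k) t k.toNat "both" : Nat) : Int))
           (((n.toNat.choose k.toNat : Nat) : Int) * ((wsum (n - k) t k.toNat "only_wt5" : Nat) : Int))
           (((n.toNat.choose k.toNat : Nat) : Int) * ((wsum (n - k) t k.toNat "only_wt6" : Nat) : Int))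
           (((n.toNat.choose k.toNat : Nat) : Int) * ((wsum (n - k) t k.toNat "neither" : Nat) : Int))).items := by
  have hKk : k = ((k.toNat : Nat) : Int) := (Int.toNat_of_nonneg hk).symm
  have h0 : brute_counts n k t
      = ((combs k.toNat (PySem.List.pyRange 0 n 1)).foldl
          (fun counts _q =>
            (PySem.List.pyRange 0 ((1 : Int) <<< k.toNat) 1).foldl
              (fun counts pat =>
                counts.modify
                  (cell (feasible (popcount pat k) (n - k) (t - 1))
                        (feasible (popcount pat k) (n - k) t))
                  0 (fun v => v + 1)) counts)
          (mk4 0 0 0 0)).items := by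
    rw [← counts0_eq]; rfl
  rw [h0, outerA]
  have hlen : ((combs k.toNat (PySem.List.pyRange 0 n 1)).length : Int)
      = ((n.toNat.choose k.toNat : Nat) : Int) := by
    rw [combs_length, PySem.List.length_pyRange_one]
    norm_num
  rw [hlen]
  have hpc : ∀ key, (patCnt (n - k) t k key (PySem.List.pyRange 0 ((1 : Int) <<< k.toNat) 1) : Nat)
      = wsum (n - k) t k.toNat key :=
    fun key => patCnt_eq (n - k) t k k.toNat hKk key
  simp only [hpc, zero_add]

theorem B_eq (n k t : Int) (hk : 0 ≤ k) :
    brute_counts_alt n k t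
    = (mk4 (((n.toNat.choose k.toNat : Nat) : Int) * ((wsum (n - k) t k.toNat "both" : Nat) : Int))
           (((n.toNat.choose k.toNat : Nat) : Int) * ((wsum (n - k) t k.toNat "only_wt5" : Nat) : Int))
           (((n.toNat.choose k.toNat : Nat) : Int) * ((wsum (n - k) t k.toNat "only_wt6" : Nat) : Int))
           (((n.toNat.choose k.toNat : Nat) : Int) * ((wsum (n - k) t k.toNat "neither" : Nat) : Int))).items := by
  have hKk : k = ((k.toNat : Nat) : Int) := (Int.toNat_of_nonneg hk).symm
  have hm : (if n > 0 then n else (0 : Int)) = ((n.toNat : Nat) : Int) := by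
    split_ifs <;> omega
  have h0 : brute_counts_alt n k t
      = if k > (if n > 0 then n else (0 : Int)) then (mk4 0 0 0 0).items
        else
          (((PySem.List.pyRange 0 (k + 1) 1).foldl
            (fun (st : PySem.Dict String Int × Int) z =>
              (st.1.modify (catI (n - k) t z) 0
                (fun v => v + ((PySem.List.pyRange 0 k 1).foldl
                  (fun tot i => PySem.Int.floordiv (tot * ((if n > 0 then n else 0) - i)) (i + 1)) 1) * st.2),
               PySem.Int.floordiv (st.2 * (k - z)) (z + 1)))
            (mk4 0 0 0 0, 1)).1).items := by
    rw [← counts0_eq]; rfl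
  rw [h0]
  by_cases hgt : k > (if n > 0 then n else (0 : Int))
  · rw [if_pos hgt]
    have hc : n.toNat.choose k.toNat = 0 := by
      refine Nat.choose_eq_zero_of_lt ?_
      rw [hm] at hgt
      omega
    rw [hc]
    simp
  · rw [if_neg hgt]
    have htot : ((PySem.List.pyRange 0 k 1).foldl
        (fun tot i => PySem.Int.floordiv (tot * ((if n > 0 then n else 0) - i)) (i + 1)) 1)
        = ((n.toNat.choose k.toNat : Nat) : Int) := by
      conv_lhs => rw [hKk, hm]
      rw [pyRange_natCast']
      exact total_loop n.toNat k.toNat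
    have hk1 : k + 1 = ((k.toNat + 1 : Nat) : Int) := by omega
    rw [htot, hk1, pyRange_natCast', B_loop (n - k) t _ k k.toNat hKk (k.toNat + 1)]
    simp only [wsum]
    congr 1
    rw [mk4_inj]
    refine ⟨?_, ?_, ?_, ?_⟩ <;>
      rw [zero_add, ← comp_eq]

-- ===== VERDICT (by name: the statement is the Claim_ definition above) =====
theorem brute_counts_spec : Claim_equal_brute_counts := by
  intro n k t _ hpre
  unfold Spec_brute_counts
  rw [A_eq n k t hpre, B_eq n k t hpre]
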